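-- pv_equiv track=rewrite | github.com/andrtt/senha-forte | main.py | tem_sequencia
-- ===== SOURCE A (Python) =====
-- def tem_sequencia(senha, tamanho_sequencia=3):
--
--     # Cria um dicionário para contar a ocorrência de cada caractere
--     contador = {}
--
--     for caractere in senha:
--         if caractere in contador:
--             contador[caractere] += 1
--         else:
--             contador[caractere] = 1
--
--     # Verifica se algum caractere tem uma contagem igual ou superior a tamanho_sequencia
--     for count in contador.values():
--         if count >= tamanho_sequencia:
--             return True
--
--     return False
-- ===== SOURCE B (Python) =====
-- def tem_sequencia(senha, tamanho_sequencia=3):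
--     # sort-then-scan: equal characters become adjacent, so the longest
--     # adjacent run equals that character's total frequency
--     prev = None
--     run = 0
--     for c in sorted(senha):
--         run = run + 1 if c == prev else 1
--         if run >= tamanho_sequencia:
--             return True
--         prev = c
--     return False
-- ===== Notes on version B (the rewrite author's own statement) =====
-- stated objective: alternative
-- what changed: Replaced the dict character counter plus a second pass over its values by a sort-then-scan: sort the password and walk it once tracking the current run length of equal adjacent characters, returning True as soon as a run reaches the threshold.
import Mathlib
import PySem

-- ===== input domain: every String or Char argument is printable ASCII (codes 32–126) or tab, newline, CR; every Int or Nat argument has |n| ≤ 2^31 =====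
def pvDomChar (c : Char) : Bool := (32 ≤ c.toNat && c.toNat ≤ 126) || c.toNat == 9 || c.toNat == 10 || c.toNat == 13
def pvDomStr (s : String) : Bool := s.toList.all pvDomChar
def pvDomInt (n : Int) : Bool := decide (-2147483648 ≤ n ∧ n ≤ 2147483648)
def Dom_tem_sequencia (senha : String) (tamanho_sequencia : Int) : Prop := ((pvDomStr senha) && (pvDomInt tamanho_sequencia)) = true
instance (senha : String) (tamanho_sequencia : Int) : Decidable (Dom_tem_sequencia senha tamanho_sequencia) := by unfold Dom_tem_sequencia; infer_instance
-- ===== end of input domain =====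

-- B replaces A's dict counter + values pass by sort-then-scan of adjacent runs (alternative algorithm, same result).


-- ===== PORT A =====
-- the second loop of A: scan the dict values, return True at the first count ≥ threshold
def pvCheck (t : Int) : List Int → Bool
  | [] => false
  | v :: rest => if t ≤ v then true else pvCheck t rest

def tem_sequencia (senha : String) (tamanho_sequencia : Int) : Bool :=
  let contador := senha.toList.foldl
    (fun d c => if d.contains c then d.insert c (d.getD c 0 + 1) else d.insert c 1)
    (PySem.Dict.empty : PySem.Dict Char Int)
  pvCheck tamanho_sequencia contador.values

-- ===== PORT B =====
-- B's loop: walk the sorted characters keeping the previous char and the running run length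
def pvScan (t : Int) : List Char → Option Char → Int → Bool
  | [], _, _ => false
  | c :: rest, prev, run =>
      let run' := if some c = prev then run + 1 else 1
      if t ≤ run' then true else pvScan t rest (some c) run'

def tem_sequencia_alt (senha : String) (tamanho_sequencia : Int) : Bool :=
  pvScan tamanho_sequencia (PySem.List.sorted senha.toList (fun x => x) false) none 0

-- ===== PRECONDITION & SPEC =====
def Spec_tem_sequencia (senha : String) (tamanho_sequencia : Int) (out : Bool) : Prop := out = tem_sequencia_alt senha tamanho_sequencia
instance (senha : String) (tamanho_sequencia : Int) (out : Bool) : Decidable (Spec_tem_sequencia senha tamanho_sequencia out) := by unfold Spec_tem_sequencia; infer_instance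

-- ===== CLAIM (what is proved, stated in full; the proofs are below) =====
def Claim_equal_tem_sequencia : Prop := ∀ (senha : String) (tamanho_sequencia : Int), Dom_tem_sequencia senha tamanho_sequencia → Spec_tem_sequencia senha tamanho_sequencia (tem_sequencia senha tamanho_sequencia)

-- ===== LEMMAS AND PROOFS =====

-- A's fold step is the insert-getD counter step (in the "else" branch getD is 0)
theorem pvStep_eq (d : PySem.Dict Char Int) (c : Char) :
    (if d.contains c then d.insert c (d.getD c 0 + 1) else d.insert c 1)
      = d.insert c (d.getD c 0 + 1) := by
  by_cases h : d.contains c = true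
  · simp [h]
  · have h' : d.contains c = false := by simpa using h
    rw [PySem.Dict.getD_of_not_contains d 0 h']
    simp [h']

theorem pvCheck_iff (t : Int) (vs : List Int) :
    pvCheck t vs = true ↔ ∃ v ∈ vs, t ≤ v := by
  induction vs with
  | nil => simp [pvCheck]
  | cons v rest ih =>
    by_cases h : t ≤ v
    · simp [pvCheck, h]
    · simp [pvCheck, h, ih]

-- A = "some character occurs at least t times"
theorem temA_iff (senha : String) (t : Int) :
    tem_sequencia senha t = true ↔ ∃ c ∈ senha.toList, t ≤ (senha.toList.count c : Int) := by
  have hfold : senha.toList.foldl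
      (fun d c => if d.contains c then d.insert c (d.getD c 0 + 1) else d.insert c 1)
      (PySem.Dict.empty : PySem.Dict Char Int)
      = PySem.Dict.counter senha.toList := by
    rw [show (fun (d : PySem.Dict Char Int) (c : Char) =>
        if d.contains c then d.insert c (d.getD c 0 + 1) else d.insert c 1)
        = (fun d c => d.insert c (d.getD c 0 + 1)) from funext fun d => funext fun c => pvStep_eq d c]
    exact PySem.Dict.foldl_insert_getD_add_one_eq_counter _
  have hgoal : tem_sequencia senha t
      = pvCheck t (PySem.Dict.counter senha.toList).values := by
    unfold tem_sequencia
    rw [hfold]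
  rw [hgoal]
  have hvals : (PySem.Dict.counter senha.toList).values
      = (PySem.Set.ofList senha.toList).map (fun k => (senha.toList.count k : Int)) := by
    show ((PySem.Dict.counter senha.toList).items.map (fun p => p.2))
        = (PySem.Set.ofList senha.toList).map (fun k => (senha.toList.count k : Int))
    rw [PySem.Dict.items_counter]
    simp
  rw [hvals, pvCheck_iff]
  constructor
  · rintro ⟨v, hv, hle⟩
    obtain ⟨c, hc, rfl⟩ := List.mem_map.1 hv
    exact ⟨c, (PySem.Set.mem_ofList _ _).1 hc, hle⟩
  · rintro ⟨c, hc, hle⟩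
    exact ⟨_, List.mem_map.2 ⟨c, (PySem.Set.mem_ofList _ _).2 hc, rfl⟩, hle⟩

-- main run-scan characterisation on a sorted tail
theorem pvScan_some (t : Int) (l : List Char) (p : Char) (run : Int)
    (hs : l.Pairwise (· ≤ ·)) (hp : ∀ c ∈ l, p ≤ c) (hr : run < t) :
    pvScan t l (some p) run = true ↔
      (t ≤ run + (l.count p : Int)) ∨ ∃ c ∈ l, c ≠ p ∧ t ≤ (l.count c : Int) := by
  induction l generalizing p run with
  | nil =>
    simp only [pvScan, List.count_nil]
    constructor
    · intro h; cases h
    · rintro (h | ⟨c, hc, _⟩)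
      · omega
      · cases hc
  | cons c rest ih =>
    have hrest : rest.Pairwise (· ≤ ·) := (List.pairwise_cons.1 hs).2
    have hhead : ∀ x ∈ rest, c ≤ x := (List.pairwise_cons.1 hs).1
    have hcnt1 : 1 ≤ (c :: rest).count c := List.count_pos_iff.2 List.mem_cons_self
    by_cases hcp : c = p
    · subst hcp
      have hstep : pvScan t (c :: rest) (some c) run
          = (if t ≤ run + 1 then true else pvScan t rest (some c) (run + 1)) := by
        simp only [pvScan, if_true]
      rw [hstep]
      by_cases ht : t ≤ run + 1
      · rw [if_pos ht]
        constructor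
        · intro _
          left
          omega
        · intro _; rfl
      · rw [if_neg ht]
        rw [ih c (run + 1) hrest hhead (by omega)]
        constructor
        · rintro (h | ⟨x, hx, hxc, hle⟩)
          · left
            rw [List.count_cons_self]
            push_cast
            omega
          · right
            refine ⟨x, List.mem_cons_of_mem _ hx, hxc, ?_⟩
            rwa [List.count_cons_of_ne (Ne.symm hxc)]
        · rintro (h | ⟨x, hx, hxc, hle⟩)
          · left
            rw [List.count_cons_self] at h
            push_cast at h
            omega
          · right
            rcases List.mem_cons.1 hx with rfl | hx'
            · exact absurd rfl hxc
            · refine ⟨x, hx', hxc, ?_⟩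
              rwa [List.count_cons_of_ne (Ne.symm hxc)] at hle
    · -- c ≠ p, so p < c and p occurs nowhere in c :: rest
      have hplt : p < c := lt_of_le_of_ne (hp c List.mem_cons_self) (fun h => hcp h.symm)
      have hnomem : p ∉ c :: rest := by
        intro hmem
        rcases List.mem_cons.1 hmem with rfl | hmem'
        · exact absurd rfl hcp
        · exact absurd (hhead p hmem') (not_le.2 hplt)
      have hcount0 : (c :: rest).count p = 0 := List.count_eq_zero.2 hnomem
      have hne_all : ∀ x ∈ c :: rest, x ≠ p := fun x hx h => hnomem (h ▸ hx)
      have hstep : pvScan t (c :: rest) (some p) run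
          = (if t ≤ 1 then true else pvScan t rest (some c) 1) := by
        simp only [pvScan, Option.some.injEq, if_neg hcp]
      rw [hstep, hcount0]
      by_cases ht : t ≤ 1
      · rw [if_pos ht]
        constructor
        · intro _
          right
          exact ⟨c, List.mem_cons_self, hne_all c List.mem_cons_self, by omega⟩
        · intro _; rfl
      · rw [if_neg ht]
        rw [ih c 1 hrest hhead (by omega)]
        constructor
        · rintro (h | ⟨x, hx, hxc, hle⟩)
          · right
            refine ⟨c, List.mem_cons_self, hne_all c List.mem_cons_self, ?_⟩
            rw [List.count_cons_self]
            push_cast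
            omega
          · right
            refine ⟨x, List.mem_cons_of_mem _ hx, hne_all x (List.mem_cons_of_mem _ hx), ?_⟩
            rwa [List.count_cons_of_ne (Ne.symm hxc)]
        · rintro (h | ⟨x, hx, hxp, hle⟩)
          · push_cast at h; omega
          · rcases List.mem_cons.1 hx with rfl | hx'
            · left
              rw [List.count_cons_self] at hle
              push_cast at hle
              omega
            · by_cases hxc : x = c
              · subst hxc
                left
                rw [List.count_cons_self] at hle
                push_cast at hle
                omega
              · right
                refine ⟨x, hx', hxc, ?_⟩
                rwa [List.count_cons_of_ne (Ne.symm hxc)] at hle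

-- B on a sorted list = "some character occurs at least t times"
theorem pvScan_top (t : Int) (l : List Char) (hs : l.Pairwise (· ≤ ·)) :
    pvScan t l none 0 = true ↔ ∃ c ∈ l, t ≤ (l.count c : Int) := by
  cases l with
  | nil => simp [pvScan]
  | cons c rest =>
    have hrest : rest.Pairwise (· ≤ ·) := (List.pairwise_cons.1 hs).2
    have hhead : ∀ x ∈ rest, c ≤ x := (List.pairwise_cons.1 hs).1
    have hcnt1 : 1 ≤ (c :: rest).count c := List.count_pos_iff.2 List.mem_cons_self
    have hstep : pvScan t (c :: rest) none 0
        = (if t ≤ 1 then true else pvScan t rest (some c) 1) := by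
      simp only [pvScan, reduceCtorEq, if_false]
    rw [hstep]
    by_cases ht : t ≤ 1
    · rw [if_pos ht]
      constructor
      · intro _
        exact ⟨c, List.mem_cons_self, by omega⟩
      · intro _; rfl
    · rw [if_neg ht]
      rw [pvScan_some t rest c 1 hrest hhead (by omega)]
      constructor
      · rintro (h | ⟨x, hx, hxc, hle⟩)
        · refine ⟨c, List.mem_cons_self, ?_⟩
          rw [List.count_cons_self]
          push_cast
          omega
        · refine ⟨x, List.mem_cons_of_mem _ hx, ?_⟩
          rwa [List.count_cons_of_ne (Ne.symm hxc)]
      · rintro ⟨x, hx, hle⟩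
        rcases List.mem_cons.1 hx with rfl | hx'
        · left
          rw [List.count_cons_self] at hle
          push_cast at hle
          omega
        · by_cases hxc : x = c
          · subst hxc
            left
            rw [List.count_cons_self] at hle
            push_cast at hle
            omega
          · right
            refine ⟨x, hx', hxc, ?_⟩
            rwa [List.count_cons_of_ne (Ne.symm hxc)] at hle

theorem temB_iff (senha : String) (t : Int) :
    tem_sequencia_alt senha t = true ↔ ∃ c ∈ senha.toList, t ≤ (senha.toList.count c : Int) := by
  unfold tem_sequencia_alt
  have hperm : (PySem.List.sorted senha.toList (fun x => x) false).Perm senha.toList :=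
    PySem.List.sorted_perm _ _ _
  have hpair : (PySem.List.sorted senha.toList (fun x => x) false).Pairwise (· ≤ ·) := by
    simpa using PySem.List.sorted_pairwise (xs := senha.toList) (key := fun x => x)
  rw [pvScan_top t _ hpair]
  constructor
  · rintro ⟨c, hc, hle⟩
    exact ⟨c, hperm.mem_iff.1 hc, by rwa [hperm.count_eq] at hle⟩
  · rintro ⟨c, hc, hle⟩
    exact ⟨c, hperm.mem_iff.2 hc, by rwa [hperm.count_eq]⟩

-- ===== VERDICT (by name: the statement is the Claim_ definition above) =====
theorem tem_sequencia_spec : Claim_equal_tem_sequencia := by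
  intro senha t _
  show tem_sequencia senha t = tem_sequencia_alt senha t
  rw [Bool.eq_iff_iff, temA_iff, temB_iff]
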